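-- pv_equiv track=rewrite | github.com/for-geeks/geek-car | modules/exercises/sense_line.py | get_midpoint
-- ===== SOURCE A (Python) =====
-- road_weight = 260
--
-- def get_midpoint(leftx, lefty, rightx, righty, shape):
--     mean_x = []
--     mean_y = []
--     tag_y = shape[0] - 1
--
--     while tag_y >= 0:
--         left_x_0 = -1
--         right_x_0 = shape[1]
--         if tag_y in lefty:
--             for i_y, ic in enumerate(lefty):
--                 if ic == tag_y:
--                     left_x_0 = leftx[i_y]
--                     break
--         if tag_y in righty:
--             for i_y, ic in enumerate(righty):
--                 if ic == tag_y:
--                     right_x_0 = rightx[i_y]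
--                     break
--
--         if left_x_0 == -1 and right_x_0 == shape[1]:
--             tag_y -= 1
--             continue
--
--         # left no
--         if right_x_0 < shape[1] and left_x_0 == -1:
--             left_x_0 = right_x_0 - road_weight
--
--         if right_x_0 == shape[1] and left_x_0 > -1:
--             right_x_0 = left_x_0 + road_weight
--
--         mean_x.append(int((right_x_0 - left_x_0) / 2 + left_x_0))
--         mean_y.append(int(tag_y))
--
--         tag_y -= 1
--
--     return mean_x, mean_y
-- ===== SOURCE B (Python) =====
-- road_weight = 260
--
--
-- def get_midpoint(leftx, lefty, rightx, righty, shape):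
--     # Index each y-list once (first occurrence wins), then walk only the
--     # rows that are actually present, in descending order.
--     leftidx = {}
--     for i, y in enumerate(lefty):
--         if y not in leftidx:
--             leftidx[y] = i
--     rightidx = {}
--     for i, y in enumerate(righty):
--         if y not in rightidx:
--             rightidx[y] = i
--     rows = ({y for y in leftidx if 0 <= y < shape[0]}
--             | {y for y in rightidx if 0 <= y < shape[0]})
--     mean_x = []
--     mean_y = []
--     for y in sorted(rows, reverse=True):
--         left_x_0 = leftx[leftidx[y]] if y in leftidx else -1
--         right_x_0 = rightx[rightidx[y]] if y in rightidx else shape[1]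
--         if left_x_0 == -1 and right_x_0 == shape[1]:
--             continue
--         if right_x_0 < shape[1] and left_x_0 == -1:
--             left_x_0 = right_x_0 - road_weight
--         if right_x_0 == shape[1] and left_x_0 > -1:
--             right_x_0 = left_x_0 + road_weight
--         mean_x.append(int((right_x_0 - left_x_0) / 2 + left_x_0))
--         mean_y.append(int(y))
--     return mean_x, mean_y
-- ===== Notes on version B (the rewrite author's own statement) =====
-- stated objective: faster
-- what changed: A scans every row tag_y = shape[0]-1..0 and linearly searches lefty/righty (membership test plus enumerate loop) per row; B builds a first-occurrence index dict for each y-list in one pass, takes the set of rows actually present within [0, shape[0]), and walks that set sorted in descending order with O(1) lookups.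
import Mathlib
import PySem

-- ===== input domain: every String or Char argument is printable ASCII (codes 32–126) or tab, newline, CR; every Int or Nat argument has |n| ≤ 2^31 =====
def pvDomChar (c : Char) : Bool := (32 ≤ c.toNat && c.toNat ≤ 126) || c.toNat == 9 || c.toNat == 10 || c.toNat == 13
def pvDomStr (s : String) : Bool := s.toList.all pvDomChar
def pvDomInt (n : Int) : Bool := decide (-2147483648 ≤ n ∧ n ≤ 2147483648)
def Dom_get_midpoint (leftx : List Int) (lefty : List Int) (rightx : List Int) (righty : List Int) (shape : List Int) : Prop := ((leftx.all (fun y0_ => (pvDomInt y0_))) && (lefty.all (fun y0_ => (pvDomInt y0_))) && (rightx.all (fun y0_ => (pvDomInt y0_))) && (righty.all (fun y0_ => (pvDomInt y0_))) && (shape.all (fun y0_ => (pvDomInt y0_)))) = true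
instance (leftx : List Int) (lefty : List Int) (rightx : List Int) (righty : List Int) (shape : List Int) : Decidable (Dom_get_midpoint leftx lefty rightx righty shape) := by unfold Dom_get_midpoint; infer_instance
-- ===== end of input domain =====

-- B replaces A's scan of every row of the image (with a linear search of lefty/righty per row)
-- by one first-occurrence index per y-list and a single sorted-descending pass over the rows
-- actually present (objective: faster; return value only, no argument is mutated).

-- ===== PORT A =====
def road_weight : Int := 260

-- int((right_x_0 - left_x_0) / 2 + left_x_0): the float value is exactly (l + r) / 2
-- (division by 2 and the addition are exact for |values| ≤ 2^33 < 2^53), and int()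
-- truncates toward zero, i.e. PySem.Int.truncdiv (l + r) 2.  Both Pythons contain
-- this very expression, so both ports share this helper.
def pyMeanInt (l r : Int) : Int := PySem.Int.truncdiv (l + r) 2

-- the while-loop of A; fuel n+1 means tag_y = n (tag_y runs shape[0]-1, …, 0)
def gmLoopA (leftx lefty rightx righty : List Int) (s1 : Int) : Nat → List Int × List Int
  | 0 => ([], [])
  | n + 1 =>
    let tag_y : Int := (n : Int)
    -- 'if tag_y in lefty: for i_y, ic in enumerate(lefty): if ic == tag_y: left_x_0 = leftx[i_y]; break'
    let left_x_0 : Int :=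
      if tag_y ∈ lefty then
        match PySem.List.index? lefty tag_y with
        | some i => (PySem.List.pyGet? leftx (i : Int)).getD 0   -- none (IndexError) excluded by Pre_
        | none => -1
      else -1
    let right_x_0 : Int :=
      if tag_y ∈ righty then
        match PySem.List.index? righty tag_y with
        | some i => (PySem.List.pyGet? rightx (i : Int)).getD 0  -- none (IndexError) excluded by Pre_
        | none => s1
      else s1
    if left_x_0 = -1 ∧ right_x_0 = s1 then
      gmLoopA leftx lefty rightx righty s1 n
    else
      let left_x_1 : Int := if right_x_0 < s1 ∧ left_x_0 = -1 then right_x_0 - road_weight else left_x_0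
      let right_x_1 : Int := if right_x_0 = s1 ∧ left_x_1 > -1 then left_x_1 + road_weight else right_x_0
      let rest := gmLoopA leftx lefty rightx righty s1 n
      (pyMeanInt left_x_1 right_x_1 :: rest.1, tag_y :: rest.2)

def get_midpoint (leftx : List Int) (lefty : List Int) (rightx : List Int) (righty : List Int) (shape : List Int) : List Int × List Int :=
  let s0 : Int := (PySem.List.pyGet? shape 0).getD 0   -- shape[0]; shape = [] (IndexError) excluded by Pre_
  let s1 : Int := (PySem.List.pyGet? shape 1).getD 0   -- shape[1]; read by A in every iteration, Pre_ makes it defined whenever the loop runs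
  gmLoopA leftx lefty rightx righty s1 s0.toNat

-- ===== PORT B =====
-- 'for i, y in enumerate(ys): if y not in idx: idx[y] = i'
def gmFirstIdx (ys : List Int) : PySem.Dict Int Int :=
  (PySem.List.enumerate ys).foldl
    (fun d p => if d.contains p.2 then d else d.insert p.2 p.1) PySem.Dict.empty

def get_midpoint_alt (leftx : List Int) (lefty : List Int) (rightx : List Int) (righty : List Int) (shape : List Int) : List Int × List Int :=
  let leftidx := gmFirstIdx lefty
  let rightidx := gmFirstIdx righty
  let s0 : Int := (PySem.List.pyGet? shape 0).getD 0   -- shape[0]; shape = [] excluded by Pre_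
  let rows : PySem.Set Int :=
    PySem.Set.union
      (PySem.Set.ofList (leftidx.keys.filter (fun y => decide (0 ≤ y) && decide (y < s0))))
      (rightidx.keys.filter (fun y => decide (0 ≤ y) && decide (y < s0)))
  let s1 : Int := (PySem.List.pyGet? shape 1).getD 0   -- shape[1]; defined whenever the loop runs, by Pre_
  (PySem.List.sorted rows (fun y => y) true).foldl
    (fun acc y =>
      let left_x_0 : Int :=
        match leftidx.get? y with
        | some i => (PySem.List.pyGet? leftx i).getD 0   -- none (IndexError) excluded by Pre_
        | none => -1
      let right_x_0 : Int :=
        match rightidx.get? y with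
        | some i => (PySem.List.pyGet? rightx i).getD 0  -- none (IndexError) excluded by Pre_
        | none => s1
      if left_x_0 = -1 ∧ right_x_0 = s1 then acc
      else
        let left_x_1 : Int := if right_x_0 < s1 ∧ left_x_0 = -1 then right_x_0 - road_weight else left_x_0
        let right_x_1 : Int := if right_x_0 = s1 ∧ left_x_1 > -1 then left_x_1 + road_weight else right_x_0
        (acc.1 ++ [pyMeanInt left_x_1 right_x_1], acc.2 ++ [y]))
    ([], [])

-- ===== PRECONDITION & SPEC =====
-- Pre_ = exactly the inputs on which A returns: shape is non-empty, shape has a second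
-- entry whenever the loop body runs (shape[0] ≥ 1), and for every y-value hit by the scan
-- the first index of y in lefty/righty is a valid index into leftx/rightx (else IndexError).
def Pre_get_midpoint (leftx : List Int) (lefty : List Int) (rightx : List Int) (righty : List Int) (shape : List Int) : Prop :=
  shape ≠ [] ∧
  (1 ≤ (PySem.List.pyGet? shape 0).getD 0 → 2 ≤ shape.length) ∧
  (∀ y ∈ lefty, 0 ≤ y ∧ y < (PySem.List.pyGet? shape 0).getD 0 →
      (PySem.List.index? lefty y).getD 0 < leftx.length) ∧
  (∀ y ∈ righty, 0 ≤ y ∧ y < (PySem.List.pyGet? shape 0).getD 0 →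
      (PySem.List.index? righty y).getD 0 < rightx.length)
instance (leftx : List Int) (lefty : List Int) (rightx : List Int) (righty : List Int) (shape : List Int) : Decidable (Pre_get_midpoint leftx lefty rightx righty shape) := by unfold Pre_get_midpoint; infer_instance

def pvWitness_get_midpoint : List Int × List Int × List Int × List Int × List Int :=
  ([5], [2], [100], [1], [3, 320])

def Spec_get_midpoint (leftx : List Int) (lefty : List Int) (rightx : List Int) (righty : List Int) (shape : List Int) (out : List Int × List Int) : Prop := out = get_midpoint_alt leftx lefty rightx righty shape
instance (leftx : List Int) (lefty : List Int) (rightx : List Int) (righty : List Int) (shape : List Int) (out : List Int × List Int) : Decidable (Spec_get_midpoint leftx lefty rightx righty shape out) := by unfold Spec_get_midpoint; infer_instance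

-- ===== CLAIM (what is proved, stated in full; the proofs are below) =====
def Claim_equal_get_midpoint : Prop := ∀ (leftx : List Int) (lefty : List Int) (rightx : List Int) (righty : List Int) (shape : List Int), Dom_get_midpoint leftx lefty rightx righty shape → Pre_get_midpoint leftx lefty rightx righty shape → Spec_get_midpoint leftx lefty rightx righty shape (get_midpoint leftx lefty rightx righty shape)

-- ===== LEMMAS AND PROOFS =====

-- the per-row computation both loops perform, phrased through index? (A's lookups)
def gmRow (leftx lefty rightx righty : List Int) (s1 y : Int) : Option (Int × Int) :=
  let left_x_0 : Int :=
    match PySem.List.index? lefty y with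
    | some i => (PySem.List.pyGet? leftx (i : Int)).getD 0
    | none => -1
  let right_x_0 : Int :=
    match PySem.List.index? righty y with
    | some i => (PySem.List.pyGet? rightx (i : Int)).getD 0
    | none => s1
  if left_x_0 = -1 ∧ right_x_0 = s1 then none
  else
    let left_x_1 : Int := if right_x_0 < s1 ∧ left_x_0 = -1 then right_x_0 - road_weight else left_x_0
    let right_x_1 : Int := if right_x_0 = s1 ∧ left_x_1 > -1 then left_x_1 + road_weight else right_x_0
    some (pyMeanInt left_x_1 right_x_1, y)

-- tag_y values n-1, …, 0 as Ints
def gmDesc (n : Nat) : List Int := PySem.List.pyRange ((n : Int) - 1) (-1) (-1)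

lemma gmDesc_succ (n : Nat) : gmDesc (n + 1) = (n : Int) :: gmDesc n := by
  unfold gmDesc
  rw [PySem.List.pyRange_neg_one_cons (by push_cast; omega)]
  norm_num

lemma mem_gmDesc (n : Nat) (y : Int) : y ∈ gmDesc n ↔ 0 ≤ y ∧ y < (n : Int) := by
  unfold gmDesc
  rw [PySem.List.mem_pyRange_neg_one]
  omega

lemma pairwise_gt_gmDesc (n : Nat) : (gmDesc n).Pairwise (fun a b => b < a) := by
  unfold gmDesc
  rw [PySem.List.pyRange_neg_one_eq_reverse, List.pairwise_reverse]
  exact PySem.List.pairwise_lt_pyRange_one _ _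

lemma nodup_gmDesc (n : Nat) : (gmDesc n).Nodup :=
  (pairwise_gt_gmDesc n).imp (fun h => by omega)

lemma gmIf_mem_match (xs ys : List Int) (y dflt : Int) :
    (if y ∈ ys then
        match PySem.List.index? ys y with
        | some i => (PySem.List.pyGet? xs (i : Int)).getD 0
        | none => dflt
      else dflt)
    = match PySem.List.index? ys y with
      | some i => (PySem.List.pyGet? xs (i : Int)).getD 0
      | none => dflt := by
  by_cases hy : y ∈ ys
  · simp [hy]
  · have h : PySem.List.index? ys y = none := (PySem.List.index?_eq_none_iff ys y).2 hy
    rw [PySem.List.index?_eq_idxOf?] at h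
    simp [hy, h]

lemma gmLoopA_succ (leftx lefty rightx righty : List Int) (s1 : Int) (n : Nat) :
    gmLoopA leftx lefty rightx righty s1 (n + 1) =
      match gmRow leftx lefty rightx righty s1 ((n : Int)) with
      | none => gmLoopA leftx lefty rightx righty s1 n
      | some p => (p.1 :: (gmLoopA leftx lefty rightx righty s1 n).1,
                   p.2 :: (gmLoopA leftx lefty rightx righty s1 n).2) := by
  simp only [gmLoopA, gmRow, gmIf_mem_match]
  cases hL : List.idxOf? ((n : Int)) lefty <;> cases hR : List.idxOf? ((n : Int)) righty <;>
    split_ifs <;> simp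

lemma loopA_eq (leftx lefty rightx righty : List Int) (s1 : Int) (n : Nat) :
    gmLoopA leftx lefty rightx righty s1 n =
      (((gmDesc n).filterMap (gmRow leftx lefty rightx righty s1)).map Prod.fst,
       ((gmDesc n).filterMap (gmRow leftx lefty rightx righty s1)).map Prod.snd) := by
  induction n with
  | zero => simp [gmLoopA, gmDesc]
  | succ n ih =>
    rw [gmLoopA_succ, gmDesc_succ, List.filterMap_cons]
    cases hg : gmRow leftx lefty rightx righty s1 ((n : Int)) <;> simp [ih, hg]


lemma firstIdx_get?_aux (ys : List Int) (y : Int) (k : Int) (d : PySem.Dict Int Int) :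
    ((PySem.List.enumerate ys k).foldl
      (fun d p => if d.contains p.2 then d else d.insert p.2 p.1) d).get? y =
      if (d.get? y).isSome then d.get? y
      else (PySem.List.index? ys y).map (fun i => (i : Int) + k) := by
  induction ys generalizing k d with
  | nil =>
    cases h : d.get? y <;> simp [PySem.List.enumerate_nil, h]
  | cons y0 ys ih =>
    rw [PySem.List.enumerate_cons, List.foldl_cons, ih]
    by_cases hc : d.contains y0
    · rw [if_pos hc]
      by_cases hy : y0 = y
      · subst hy
        rw [PySem.Dict.contains_eq_isSome_get?] at hc
        simp [hc]
      · have h2 : PySem.List.index? (y0 :: ys) y = (PySem.List.index? ys y).map (fun i => i + 1) :=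
          PySem.List.index?_cons_of_ne ys hy
        rw [h2]
        cases hd : d.get? y <;> cases h : PySem.List.index? ys y <;>
          simp [hd, h] <;> push_cast <;> ring
    · rw [if_neg hc]
      rw [PySem.Dict.contains_eq_isSome_get?] at hc
      simp only [Bool.not_eq_true, Option.isSome_eq_false_iff, Option.isNone_iff_eq_none] at hc
      by_cases hy : y0 = y
      · subst hy
        have h1 : (d.insert y0 k).get? y0 = some k := PySem.Dict.get?_insert_self d y0 k
        have h2 : PySem.List.index? (y0 :: ys) y0 = some 0 := PySem.List.index?_cons_self y0 ys
        rw [h2]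
        simp [h1, hc]
      · have h1 : (d.insert y0 k).get? y = d.get? y := PySem.Dict.get?_insert_of_ne d k (Ne.symm hy)
        have h2 : PySem.List.index? (y0 :: ys) y = (PySem.List.index? ys y).map (fun i => i + 1) :=
          PySem.List.index?_cons_of_ne ys hy
        rw [h1, h2]
        cases h : PySem.List.index? ys y <;> simp [hc, h] <;> push_cast <;> ring


lemma firstIdx_get? (ys : List Int) (y : Int) :
    (gmFirstIdx ys).get? y = (PySem.List.index? ys y).map (fun i => (i : Int)) := by
  have := firstIdx_get?_aux ys y 0 PySem.Dict.empty
  simpa [gmFirstIdx, PySem.Dict.get?_empty] using this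

lemma mem_firstIdx_keys (ys : List Int) (y : Int) : y ∈ (gmFirstIdx ys).keys ↔ y ∈ ys := by
  rw [← PySem.Dict.contains_iff_mem_keys, PySem.Dict.contains_eq_isSome_get?, firstIdx_get?,
    PySem.List.index?_eq_idxOf?]
  cases h : List.idxOf? y ys with
  | none =>
    have h2 : y ∉ ys := (PySem.List.index?_eq_none_iff ys y).1
      (by simpa [PySem.List.index?_eq_idxOf?] using h)
    simp [h2]
  | some i =>
    have h2 : y ∈ ys := (PySem.List.index?_isSome_iff ys y).1
      (by simp [PySem.List.index?_eq_idxOf?, h])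
    simp [h2]

lemma filterMap_filter_of_none {g : Int → Option (Int × Int)} {p : Int → Bool} (L : List Int)
    (h : ∀ y ∈ L, p y = false → g y = none) :
    (L.filter p).filterMap g = L.filterMap g := by
  induction L with
  | nil => rfl
  | cons x L ih =>
    by_cases hx : p x
    · simp [hx, List.filterMap_cons,
        ih (fun y hy hp => h y (List.mem_cons_of_mem x hy) hp)]
    · simp only [Bool.not_eq_true] at hx
      simp [hx, List.filterMap_cons, h x (List.mem_cons_self) hx,
        ih (fun y hy hp => h y (List.mem_cons_of_mem x hy) hp)]

lemma gmRow_none_of_absent (leftx lefty rightx righty : List Int) (s1 y : Int)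
    (hl : y ∉ lefty) (hr : y ∉ righty) : gmRow leftx lefty rightx righty s1 y = none := by
  have h1 : PySem.List.index? lefty y = none := (PySem.List.index?_eq_none_iff lefty y).2 hl
  have h2 : PySem.List.index? righty y = none := (PySem.List.index?_eq_none_iff righty y).2 hr
  rw [PySem.List.index?_eq_idxOf?] at h1 h2
  simp [gmRow, h1, h2]

-- B's sorted present-row list IS the present rows of A's descending scan
lemma sortedRows_eq (lefty righty : List Int) (s0 : Int) :
    PySem.List.sorted
      (PySem.Set.union
        (PySem.Set.ofList ((gmFirstIdx lefty).keys.filter (fun y => decide (0 ≤ y) && decide (y < s0))))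
        ((gmFirstIdx righty).keys.filter (fun y => decide (0 ≤ y) && decide (y < s0))))
      (fun y => y) true =
    (gmDesc s0.toNat).filter (fun y => decide (y ∈ lefty) || decide (y ∈ righty)) := by
  apply PySem.List.sorted_rev_eq_of_perm_of_pairwise_gt
  · rw [List.perm_ext_iff_of_nodup]
    · intro a
      rw [List.mem_filter, mem_gmDesc, PySem.Set.mem_union, PySem.Set.mem_ofList,
        List.mem_filter, List.mem_filter, mem_firstIdx_keys, mem_firstIdx_keys]
      have ht : ((s0.toNat : Nat) : Int) = max s0 0 := by omega
      simp only [Bool.or_eq_true, Bool.and_eq_true, decide_eq_true_eq, ht]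
      constructor
      · rintro ⟨⟨h0, hs⟩, hm⟩
        rcases hm with hl | hr
        · exact Or.inl ⟨hl, h0, by omega⟩
        · exact Or.inr ⟨hr, h0, by omega⟩
      · rintro (⟨hl, h0, hs⟩ | ⟨hr, h0, hs⟩)
        · exact ⟨⟨h0, by omega⟩, Or.inl hl⟩
        · exact ⟨⟨h0, by omega⟩, Or.inr hr⟩
    · exact (nodup_gmDesc _).filter _
    · exact PySem.Set.nodup_union _ _ (PySem.Set.nodup_ofList _)
  · exact (pairwise_gt_gmDesc _).filter _

lemma foldlB_eq (g : Int → Option (Int × Int))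
    (step : List Int × List Int → Int → List Int × List Int)
    (hstep : ∀ acc y, step acc y = match g y with
      | none => acc
      | some (a, b) => (acc.1 ++ [a], acc.2 ++ [b]))
    (L : List Int) (acc : List Int × List Int) :
    L.foldl step acc =
      (acc.1 ++ (L.filterMap g).map Prod.fst, acc.2 ++ (L.filterMap g).map Prod.snd) := by
  induction L generalizing acc with
  | nil => simp
  | cons x L ih =>
    rw [List.foldl_cons, hstep, List.filterMap_cons]
    cases hx : g x with
    | none => simpa using ih acc
    | some ab =>
      obtain ⟨a, b⟩ := ab
      simpa using ih (acc.1 ++ [a], acc.2 ++ [b])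

lemma rowB_eq_gmRow (leftx lefty rightx righty : List Int) (s1 : Int) :
    (fun (acc : List Int × List Int) y =>
      let left_x_0 : Int :=
        match (gmFirstIdx lefty).get? y with
        | some i => (PySem.List.pyGet? leftx i).getD 0
        | none => -1
      let right_x_0 : Int :=
        match (gmFirstIdx righty).get? y with
        | some i => (PySem.List.pyGet? rightx i).getD 0
        | none => s1
      if left_x_0 = -1 ∧ right_x_0 = s1 then acc
      else
        let left_x_1 : Int := if right_x_0 < s1 ∧ left_x_0 = -1 then right_x_0 - road_weight else left_x_0
        let right_x_1 : Int := if right_x_0 = s1 ∧ left_x_1 > -1 then left_x_1 + road_weight else right_x_0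
        (acc.1 ++ [pyMeanInt left_x_1 right_x_1], acc.2 ++ [y])) =
    (fun (acc : List Int × List Int) y =>
      match gmRow leftx lefty rightx righty s1 y with
      | none => acc
      | some (a, b) => (acc.1 ++ [a], acc.2 ++ [b])) := by
  funext acc y
  simp only [firstIdx_get?, gmRow]
  cases hL : PySem.List.index? lefty y <;> cases hR : PySem.List.index? righty y <;>
    simp only [hL, hR] <;> split_ifs <;> first | rfl | tauto

-- ===== VERDICT (by name: the statement is the Claim_ definition above) =====
theorem get_midpoint_spec : Claim_equal_get_midpoint := by
  intro leftx lefty rightx righty shape _ _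
  unfold Spec_get_midpoint
  simp only [get_midpoint, get_midpoint_alt]
  rw [loopA_eq, sortedRows_eq,
    foldlB_eq (gmRow leftx lefty rightx righty ((PySem.List.pyGet? shape 1).getD 0)) _
      (fun acc y => congrFun (congrFun (rowB_eq_gmRow leftx lefty rightx righty
        ((PySem.List.pyGet? shape 1).getD 0)) acc) y),
    filterMap_filter_of_none _ (fun y hy hp => by
      simp only [Bool.or_eq_false_iff, decide_eq_false_iff_not] at hp
      exact gmRow_none_of_absent leftx lefty rightx righty _ y hp.1 hp.2)]
  simp
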